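-- pv_equiv track=rewrite | github.com/milu-buet/google-code-jam | Qualification Round Africa 2010/T9 Spelling/solution.py | getT9
-- ===== SOURCE A (Python) =====
-- T9_dict = {
-- 	' ':	'0',
-- 	'abc':  '2',
-- 	'def':  '3',
-- 	'ghi':  '4',
-- 	'jkl':  '5',
-- 	'mno':  '6',
-- 	'pqrs': '7',
-- 	'tuv':  '8',
-- 	'wxyz':  '9',
-- }
--
-- def getT9(words):
--
-- 	ans = []
-- 	t9 = None
-- 	pre_key = None
-- 	for char in words:
-- 		for key in T9_dict.keys():
-- 			if char in key:
-- 				pos = key.index(char) +1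
-- 				if pre_key and pre_key == T9_dict[key]:
-- 					ans.append(" ")
-- 				t9 = T9_dict[key]*pos
-- 				pre_key = T9_dict[key]
-- 				ans.append(t9)
--
-- 	return "".join(ans)
-- ===== SOURCE B (Python) =====
-- # B: two staged passes — tokenize each mapped char to its full keypress token, then
-- # stitch runs of tokens sharing a leading digit with spaces (no running prev state).
-- _T9_TOKENS = {ch: digit * (i + 1)
--               for group, digit in ((' ', '0'), ('abc', '2'), ('def', '3'),
--                                    ('ghi', '4'), ('jkl', '5'), ('mno', '6'),
--                                    ('pqrs', '7'), ('tuv', '8'), ('wxyz', '9'))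
--               for i, ch in enumerate(group)}
--
-- def getT9(words):
--     tokens = [_T9_TOKENS[c] for c in words if c in _T9_TOKENS]
--     pieces = []
--     i = 0
--     n = len(tokens)
--     while i < n:
--         j = i + 1
--         while j < n and tokens[j][0] == tokens[i][0]:
--             j += 1
--         pieces.append(" ".join(tokens[i:j]))
--         i = j
--     return "".join(pieces)
-- ===== Notes on version B (the rewrite author's own statement) =====
-- stated objective: faster
-- what changed: Replaces A's single stateful pass (per-character scan over all nine T9 group strings with a running pre_key) by two staged passes: a tokenize pass via a flat char->token dict built once, then a run-detection pass that groups consecutive tokens sharing a leading digit and joins each run with spaces.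
import Mathlib
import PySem

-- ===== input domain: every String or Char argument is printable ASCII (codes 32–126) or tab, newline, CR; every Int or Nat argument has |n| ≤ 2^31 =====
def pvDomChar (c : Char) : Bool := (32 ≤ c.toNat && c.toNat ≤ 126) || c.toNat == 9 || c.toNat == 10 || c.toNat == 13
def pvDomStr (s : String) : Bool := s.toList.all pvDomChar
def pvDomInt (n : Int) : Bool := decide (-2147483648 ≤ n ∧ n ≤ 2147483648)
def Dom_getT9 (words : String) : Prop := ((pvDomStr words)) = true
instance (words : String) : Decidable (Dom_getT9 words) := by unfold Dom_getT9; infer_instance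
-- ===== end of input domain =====

-- B replaces A's single stateful pass (per-character scan over the nine T9 groups with a
-- running previous-key variable) by two staged passes: tokenize every mapped character to
-- its full keypress token, then detect runs of tokens sharing a leading digit and join
-- each run with spaces.

-- Python's  s * n  (string repetition); shared by both ports.
def pvStrMul (s : String) (n : Int) : String :=
  String.ofList (PySem.List.pyRepeat s.toList n)

-- ===== PORT A =====
-- T9_dict, keys as lists of chars (exact for the membership/index tests A performs on them).
def pvPairsA : List (List Char × String) :=
  [([' '], "0"), (['a','b','c'], "2"), (['d','e','f'], "3"), (['g','h','i'], "4"),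
   (['j','k','l'], "5"), (['m','n','o'], "6"), (['p','q','r','s'], "7"),
   (['t','u','v'], "8"), (['w','x','y','z'], "9")]

-- the body of A's outer loop: scan all keys; `char in key` is char membership (keys are
-- letter groups, char has length 1); key.index(char) cannot raise under the guard (getD 0
-- is never taken); `pre_key and pre_key == v` = pre_key is a (truthy) digit string equal to v.
def pvStepA (st : List String × Option String) (c : Char) : List String × Option String :=
  pvPairsA.foldl (fun st kv =>
    if c ∈ kv.1 then
      let pos : Int := ((PySem.List.index? kv.1 c).getD 0 : Nat) + 1
      let ans1 := if st.2 == some kv.2 then st.1 ++ [" "] else st.1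
      (ans1 ++ [pvStrMul kv.2 pos], some kv.2)
    else st) st

def getT9 (words : String) : String :=
  PySem.Str.join "" ((words.toList.foldl pvStepA ([], none)).1)

-- ===== PORT B =====
def pvGroupsB : List (String × String) :=
  [(" ", "0"), ("abc", "2"), ("def", "3"), ("ghi", "4"), ("jkl", "5"),
   ("mno", "6"), ("pqrs", "7"), ("tuv", "8"), ("wxyz", "9")]

-- the flat table: ch → full keypress token digit*(i+1), built once (B's dict comprehension).
def pvTableB : PySem.Dict Char String :=
  pvGroupsB.foldl (fun d g =>
    (PySem.List.enumerate g.1.toList).foldl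
      (fun d p => d.insert p.2 (pvStrMul g.2 (p.1 + 1))) d)
    PySem.Dict.empty

-- Python's tokens[i][0]: tokens are nonempty keypress strings, so headD is exact here.
def pvHd (t : String) : Char := t.toList.headD ' '

-- B's inner while loop: split off the run of tokens whose leading digit is c, and the rest.
def pvRun (c : Char) : List String → List String × List String
  | [] => ([], [])
  | t :: ts =>
    if pvHd t == c then
      let p := pvRun c ts
      (t :: p.1, p.2)
    else ([], t :: ts)

-- termination measure for pvGroups (the port cites it in decreasing_by)
lemma pvRun_len_le (c : Char) (ts : List String) : (pvRun c ts).2.length ≤ ts.length := by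
  induction ts with
  | nil => simp [pvRun]
  | cons t ts ih =>
    simp only [pvRun]
    split
    · simpa using Nat.le_succ_of_le ih
    · simp

-- B's outer while loop: the list of runs.
def pvRuns : List String → List (List String)
  | [] => []
  | t :: ts =>
    (t :: (pvRun (pvHd t) ts).1) :: pvRuns (pvRun (pvHd t) ts).2
termination_by ts => ts.length
decreasing_by
  have := pvRun_len_le (pvHd t) ts
  simp
  omega

def getT9_alt (words : String) : String :=
  PySem.Str.join ""
    ((pvRuns (words.toList.filterMap (fun c => pvTableB.get? c))).map
      (fun g => PySem.Str.join " " g))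

-- ===== PRECONDITION & SPEC =====
def Spec_getT9 (words : String) (out : String) : Prop := out = getT9_alt words
instance (words : String) (out : String) : Decidable (Spec_getT9 words out) := by unfold Spec_getT9; infer_instance

-- ===== CLAIM (what is proved, stated in full; the proofs are below) =====
def Claim_equal_getT9 : Prop := ∀ (words : String), Dom_getT9 words → Spec_getT9 words (getT9 words)

-- ===== LEMMAS AND PROOFS =====

-- proof-side flat table: (character, digit string, keypress token)
def pvFlat : List (Char × String × String) :=
  [(' ', "0", "0"),
   ('a', "2", "2"), ('b', "2", "22"), ('c', "2", "222"),
   ('d', "3", "3"), ('e', "3", "33"), ('f', "3", "333"),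
   ('g', "4", "4"), ('h', "4", "44"), ('i', "4", "444"),
   ('j', "5", "5"), ('k', "5", "55"), ('l', "5", "555"),
   ('m', "6", "6"), ('n', "6", "66"), ('o', "6", "666"),
   ('p', "7", "7"), ('q', "7", "77"), ('r', "7", "777"), ('s', "7", "7777"),
   ('t', "8", "8"), ('u', "8", "88"), ('v', "8", "888"),
   ('w', "9", "9"), ('x', "9", "99"), ('y', "9", "999"),
   ('z', "9", "9999")]

def pvLook (c : Char) : Option (String × String) :=
  (pvFlat.find? (fun p => p.1 == c)).map (·.2)

-- A's loop body at the token level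
def pvStepT (st : List String × Option String) (dt : String × String) :
    List String × Option String :=
  ((if st.2 == some dt.1 then st.1 ++ [" "] else st.1) ++ [dt.2], some dt.1)

-- the answer list A accumulates, as a recursion over the token pairs
def pvRender (pre : Option String) : List (String × String) → List String
  | [] => []
  | dt :: ps => (if pre == some dt.1 then [" "] else []) ++ [dt.2] ++ pvRender (some dt.1) ps

-- the same, over tokens alone with the leading digit char as state
def pvRenderT (pre : Option Char) : List String → List String
  | [] => []
  | t :: ts => (if pre == some (pvHd t) then [" "] else []) ++ [t] ++ pvRenderT (some (pvHd t)) ts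

lemma pvStepA_look (st : List String × Option String) (c : Char) :
    pvStepA st c = match pvLook c with
      | none => st
      | some dt => pvStepT st dt := by
  by_cases h0 : c = ' '
  · subst h0; rfl
  by_cases h1 : c = 'a'
  · subst h1; rfl
  by_cases h2 : c = 'b'
  · subst h2; rfl
  by_cases h3 : c = 'c'
  · subst h3; rfl
  by_cases h4 : c = 'd'
  · subst h4; rfl
  by_cases h5 : c = 'e'
  · subst h5; rfl
  by_cases h6 : c = 'f'
  · subst h6; rfl
  by_cases h7 : c = 'g'
  · subst h7; rfl
  by_cases h8 : c = 'h'
  · subst h8; rfl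
  by_cases h9 : c = 'i'
  · subst h9; rfl
  by_cases h10 : c = 'j'
  · subst h10; rfl
  by_cases h11 : c = 'k'
  · subst h11; rfl
  by_cases h12 : c = 'l'
  · subst h12; rfl
  by_cases h13 : c = 'm'
  · subst h13; rfl
  by_cases h14 : c = 'n'
  · subst h14; rfl
  by_cases h15 : c = 'o'
  · subst h15; rfl
  by_cases h16 : c = 'p'
  · subst h16; rfl
  by_cases h17 : c = 'q'
  · subst h17; rfl
  by_cases h18 : c = 'r'
  · subst h18; rfl
  by_cases h19 : c = 's'
  · subst h19; rfl
  by_cases h20 : c = 't'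
  · subst h20; rfl
  by_cases h21 : c = 'u'
  · subst h21; rfl
  by_cases h22 : c = 'v'
  · subst h22; rfl
  by_cases h23 : c = 'w'
  · subst h23; rfl
  by_cases h24 : c = 'x'
  · subst h24; rfl
  by_cases h25 : c = 'y'
  · subst h25; rfl
  by_cases h26 : c = 'z'
  · subst h26; rfl
  have h0' : ¬ ' ' = c := fun hh => h0 hh.symm
  have h1' : ¬ 'a' = c := fun hh => h1 hh.symm
  have h2' : ¬ 'b' = c := fun hh => h2 hh.symm
  have h3' : ¬ 'c' = c := fun hh => h3 hh.symm
  have h4' : ¬ 'd' = c := fun hh => h4 hh.symm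
  have h5' : ¬ 'e' = c := fun hh => h5 hh.symm
  have h6' : ¬ 'f' = c := fun hh => h6 hh.symm
  have h7' : ¬ 'g' = c := fun hh => h7 hh.symm
  have h8' : ¬ 'h' = c := fun hh => h8 hh.symm
  have h9' : ¬ 'i' = c := fun hh => h9 hh.symm
  have h10' : ¬ 'j' = c := fun hh => h10 hh.symm
  have h11' : ¬ 'k' = c := fun hh => h11 hh.symm
  have h12' : ¬ 'l' = c := fun hh => h12 hh.symm
  have h13' : ¬ 'm' = c := fun hh => h13 hh.symm
  have h14' : ¬ 'n' = c := fun hh => h14 hh.symm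
  have h15' : ¬ 'o' = c := fun hh => h15 hh.symm
  have h16' : ¬ 'p' = c := fun hh => h16 hh.symm
  have h17' : ¬ 'q' = c := fun hh => h17 hh.symm
  have h18' : ¬ 'r' = c := fun hh => h18 hh.symm
  have h19' : ¬ 's' = c := fun hh => h19 hh.symm
  have h20' : ¬ 't' = c := fun hh => h20 hh.symm
  have h21' : ¬ 'u' = c := fun hh => h21 hh.symm
  have h22' : ¬ 'v' = c := fun hh => h22 hh.symm
  have h23' : ¬ 'w' = c := fun hh => h23 hh.symm
  have h24' : ¬ 'x' = c := fun hh => h24 hh.symm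
  have h25' : ¬ 'y' = c := fun hh => h25 hh.symm
  have h26' : ¬ 'z' = c := fun hh => h26 hh.symm
  have hn : pvLook c = none := by
    have hf : pvFlat.find? (fun p => p.1 == c) = none := by
      rw [List.find?_eq_none]
      intro a ha
      fin_cases ha <;> simp_all
    unfold pvLook
    rw [hf]
    rfl
  simp only [hn]
  simp [pvStepA, pvPairsA, h0, h1, h2, h3, h4, h5, h6, h7, h8, h9, h10, h11, h12, h13, h14, h15, h16, h17, h18, h19, h20, h21, h22, h23, h24, h25, h26]

lemma pvTableB_look (c : Char) :
    pvTableB.get? c = (pvLook c).map (·.2) := by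
  by_cases h0 : c = ' '
  · subst h0; decide
  by_cases h1 : c = 'a'
  · subst h1; decide
  by_cases h2 : c = 'b'
  · subst h2; decide
  by_cases h3 : c = 'c'
  · subst h3; decide
  by_cases h4 : c = 'd'
  · subst h4; decide
  by_cases h5 : c = 'e'
  · subst h5; decide
  by_cases h6 : c = 'f'
  · subst h6; decide
  by_cases h7 : c = 'g'
  · subst h7; decide
  by_cases h8 : c = 'h'
  · subst h8; decide
  by_cases h9 : c = 'i'
  · subst h9; decide
  by_cases h10 : c = 'j'
  · subst h10; decide
  by_cases h11 : c = 'k'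
  · subst h11; decide
  by_cases h12 : c = 'l'
  · subst h12; decide
  by_cases h13 : c = 'm'
  · subst h13; decide
  by_cases h14 : c = 'n'
  · subst h14; decide
  by_cases h15 : c = 'o'
  · subst h15; decide
  by_cases h16 : c = 'p'
  · subst h16; decide
  by_cases h17 : c = 'q'
  · subst h17; decide
  by_cases h18 : c = 'r'
  · subst h18; decide
  by_cases h19 : c = 's'
  · subst h19; decide
  by_cases h20 : c = 't'
  · subst h20; decide
  by_cases h21 : c = 'u'
  · subst h21; decide
  by_cases h22 : c = 'v'
  · subst h22; decide
  by_cases h23 : c = 'w'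
  · subst h23; decide
  by_cases h24 : c = 'x'
  · subst h24; decide
  by_cases h25 : c = 'y'
  · subst h25; decide
  by_cases h26 : c = 'z'
  · subst h26; decide
  have h0' : ¬ ' ' = c := fun hh => h0 hh.symm
  have h1' : ¬ 'a' = c := fun hh => h1 hh.symm
  have h2' : ¬ 'b' = c := fun hh => h2 hh.symm
  have h3' : ¬ 'c' = c := fun hh => h3 hh.symm
  have h4' : ¬ 'd' = c := fun hh => h4 hh.symm
  have h5' : ¬ 'e' = c := fun hh => h5 hh.symm
  have h6' : ¬ 'f' = c := fun hh => h6 hh.symm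
  have h7' : ¬ 'g' = c := fun hh => h7 hh.symm
  have h8' : ¬ 'h' = c := fun hh => h8 hh.symm
  have h9' : ¬ 'i' = c := fun hh => h9 hh.symm
  have h10' : ¬ 'j' = c := fun hh => h10 hh.symm
  have h11' : ¬ 'k' = c := fun hh => h11 hh.symm
  have h12' : ¬ 'l' = c := fun hh => h12 hh.symm
  have h13' : ¬ 'm' = c := fun hh => h13 hh.symm
  have h14' : ¬ 'n' = c := fun hh => h14 hh.symm
  have h15' : ¬ 'o' = c := fun hh => h15 hh.symm
  have h16' : ¬ 'p' = c := fun hh => h16 hh.symm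
  have h17' : ¬ 'q' = c := fun hh => h17 hh.symm
  have h18' : ¬ 'r' = c := fun hh => h18 hh.symm
  have h19' : ¬ 's' = c := fun hh => h19 hh.symm
  have h20' : ¬ 't' = c := fun hh => h20 hh.symm
  have h21' : ¬ 'u' = c := fun hh => h21 hh.symm
  have h22' : ¬ 'v' = c := fun hh => h22 hh.symm
  have h23' : ¬ 'w' = c := fun hh => h23 hh.symm
  have h24' : ¬ 'x' = c := fun hh => h24 hh.symm
  have h25' : ¬ 'y' = c := fun hh => h25 hh.symm
  have h26' : ¬ 'z' = c := fun hh => h26 hh.symm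
  have hn : pvLook c = none := by
    have hf : pvFlat.find? (fun p => p.1 == c) = none := by
      rw [List.find?_eq_none]
      intro a ha
      fin_cases ha <;> simp_all
    unfold pvLook
    rw [hf]
    rfl
  have hk : pvTableB.keys = [' ', 'a', 'b', 'c', 'd', 'e', 'f', 'g', 'h', 'i', 'j', 'k', 'l', 'm', 'n', 'o', 'p', 'q', 'r', 's', 't', 'u', 'v', 'w', 'x', 'y', 'z'] := by decide
  rw [hn]
  simp only [Option.map_none]
  rw [PySem.Dict.get?_eq_none_iff_not_mem_keys]
  simp [hk, h0, h1, h2, h3, h4, h5, h6, h7, h8, h9, h10, h11, h12, h13, h14, h15, h16, h17, h18, h19, h20, h21, h22, h23, h24, h25, h26]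

lemma pvFoldA_eq (cs : List Char) (st : List String × Option String) :
    cs.foldl pvStepA st = (cs.filterMap pvLook).foldl pvStepT st := by
  induction cs generalizing st with
  | nil => rfl
  | cons c t ih =>
    simp only [List.foldl, List.filterMap_cons]
    rw [pvStepA_look]
    cases h : pvLook c with
    | none => simpa [h] using ih st
    | some dt => simp only [h]; exact ih _

lemma pvTokensB_eq (cs : List Char) :
    cs.filterMap (fun c => pvTableB.get? c) = (cs.filterMap pvLook).map (·.2) := by
  rw [List.map_filterMap]
  simp only [pvTableB_look]

lemma pvFoldT_render (ps : List (String × String)) (ans : List String) (pre : Option String) :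
    (ps.foldl pvStepT (ans, pre)).1 = ans ++ pvRender pre ps := by
  induction ps generalizing ans pre with
  | nil => simp [pvRender]
  | cons dt ps ih =>
    simp only [List.foldl, pvStepT, pvRender, ih]
    split <;> simp

-- every pvLook result pairs a token with its leading digit as a singleton string
lemma pvLook_prop (c : Char) (dt : String × String) (h : pvLook c = some dt) :
    dt.1 = String.ofList [pvHd dt.2] := by
  have hm : ∃ p ∈ pvFlat, p.2 = dt := by
    unfold pvLook at h
    cases hf : pvFlat.find? (fun p => p.1 == c) with
    | none => simp [hf] at h
    | some p =>
      refine ⟨p, List.mem_of_find?_eq_some hf, ?_⟩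
      simp [hf] at h; exact h
  obtain ⟨p, hp, hpe⟩ := hm
  subst hpe
  fin_cases hp <;> decide

lemma singleton_str_eq (x y : Char) :
    (String.ofList [x] == String.ofList [y]) = (x == y) := by
  by_cases h : x = y
  · simp [h]
  · have : String.ofList [x] ≠ String.ofList [y] := by
      intro he
      have := congrArg String.toList he
      simp at this
      exact h this
    simp [h, this]

lemma pvRender_renderT (ps : List (String × String)) (preC : Option Char)
    (hq : ∀ p ∈ ps, p.1 = String.ofList [pvHd p.2]) :
    pvRender (preC.map (fun x => String.ofList [x])) ps = pvRenderT preC (ps.map (·.2)) := by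
  induction ps generalizing preC with
  | nil => simp [pvRender, pvRenderT]
  | cons dt ps ih =>
    have hd : dt.1 = String.ofList [pvHd dt.2] := hq dt (List.mem_cons_self ..)
    have hrest : ∀ p ∈ ps, p.1 = String.ofList [pvHd p.2] := fun p hp => hq p (List.mem_cons_of_mem _ hp)
    simp only [pvRender, pvRenderT, List.map_cons]
    have hcmp : (preC.map (fun x => String.ofList [x]) == some dt.1)
        = (preC == some (pvHd dt.2)) := by
      cases preC with
      | none => simp
      | some x => simp [hd, Option.map_some, singleton_str_eq]
    rw [hcmp, hd]
    have := ih (some (pvHd dt.2)) hrest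
    simp only [Option.map_some] at this
    rw [this]

-- the run sub-lemma: within a run the separator fires, and after it the state is fresh
lemma pvRenderT_run (ts : List String) (c : Char) :
    pvRenderT (some c) ts
      = (pvRun c ts).1.flatMap (fun t => [" ", t]) ++ pvRenderT none (pvRun c ts).2 := by
  induction ts with
  | nil => simp [pvRun, pvRenderT]
  | cons t ts ih =>
    by_cases h : pvHd t = c
    · simp only [pvRun, pvRenderT, h, beq_self_eq_true, if_true, ite_true]
      simp [ih]
    · have hb : (pvHd t == c) = false := by simp [h]
      have hb2 : (some c == some (pvHd t)) = false := by
        simp; exact fun hh => h hh.symm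
      simp [pvRun, pvRenderT, hb, hb2]

lemma chars_join_nil_cons (a : List Char) (l : List (List Char)) :
    PySem.Chars.join [] (a :: l) = a ++ PySem.Chars.join [] l := by
  cases l with
  | nil => simp [PySem.Chars.join_singleton, PySem.Chars.join_nil]
  | cons b t => rw [PySem.Chars.join_cons_cons]; simp

lemma chars_join_nil_append (A B : List (List Char)) :
    PySem.Chars.join [] (A ++ B) = PySem.Chars.join [] A ++ PySem.Chars.join [] B := by
  induction A with
  | nil => simp [PySem.Chars.join_nil]
  | cons a t ih => simp [chars_join_nil_cons, ih]

-- " ".join(t::g) spelled as flat pieces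
lemma chars_join_space (t : List Char) (g : List (List Char)) :
    PySem.Chars.join [' '] (t :: g)
      = t ++ PySem.Chars.join [] (g.flatMap (fun x => [[' '], x])) := by
  induction g generalizing t with
  | nil => simp [PySem.Chars.join_singleton, PySem.Chars.join_nil]
  | cons b l ih =>
    rw [PySem.Chars.join_cons_cons, ih]
    simp [chars_join_nil_cons]

-- the grouped rendering equals the flat rendering, at the char level
lemma pvMain (ts : List String) :
    PySem.Chars.join [] ((pvRenderT none ts).map String.toList)
      = PySem.Chars.join []
          (((pvRuns ts).map (fun g => PySem.Str.join " " g)).map String.toList) := by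
  induction ts using pvRuns.induct with
  | case1 => simp [pvRenderT, pvRuns]
  | case2 t ts ih =>
    rw [pvRuns]
    simp only [pvRenderT, List.map_cons, List.map_append]
    rw [pvRenderT_run]
    simp only [List.map_append, chars_join_nil_append, chars_join_nil_cons]
    rw [ih]
    have hjoin : (PySem.Str.join " " (t :: (pvRun (pvHd t) ts).1)).toList
        = t.toList ++ PySem.Chars.join []
            (((pvRun (pvHd t) ts).1.flatMap (fun x => [" ", x])).map String.toList) := by
      rw [PySem.Str.toList_join]
      simp only [List.map_cons, show (" " : String).toList = [' '] from rfl]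
      rw [chars_join_space]
      congr 1
      congr 1
      simp [List.map_flatMap, List.flatMap_map]
    rw [hjoin]
    simp [PySem.Chars.join_nil]

-- ===== VERDICT (by name: the statement is the Claim_ definition above) =====
theorem getT9_spec : Claim_equal_getT9 := by
  intro words _
  unfold Spec_getT9 getT9 getT9_alt
  apply String.toList_inj.mp
  rw [pvFoldA_eq, pvFoldT_render, pvTokensB_eq]
  have hq : ∀ p ∈ words.toList.filterMap pvLook, p.1 = String.ofList [pvHd p.2] := by
    intro p hp
    obtain ⟨c, _, hc⟩ := List.mem_filterMap.mp hp
    exact pvLook_prop c p hc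
  have hr := pvRender_renderT (words.toList.filterMap pvLook) none hq
  simp only [Option.map_none] at hr
  rw [List.nil_append, hr]
  rw [PySem.Str.toList_join, PySem.Str.toList_join]
  exact pvMain ((words.toList.filterMap pvLook).map (·.2))
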